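-- pv_equiv track=rewrite | github.com/liranBecher/zap-genai-onboarding | src/email_service.py | _markdown_like_text_to_rtl_html
-- ===== SOURCE A (Python) =====
-- def _markdown_like_text_to_rtl_html(content: str) -> str:
--     lines = content.splitlines()
--     html_parts = [
--         "<html>",
--         '<body dir="rtl" style="direction: rtl; text-align: right; font-family: Arial, sans-serif; line-height: 1.6;">',
--     ]
--
--     in_list = False
--     for raw_line in lines:
--         line = raw_line.strip()
--
--         if not line:
--             if in_list:
--                 html_parts.append("</ul>")
--                 in_list = False
--             html_parts.append('<div style="height: 8px;"></div>')
--             continue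
--
--         if line.startswith("# "):
--             if in_list:
--                 html_parts.append("</ul>")
--                 in_list = False
--             html_parts.append(f"<h1>{line[2:].strip()}</h1>")
--             continue
--
--         if line.startswith("## "):
--             if in_list:
--                 html_parts.append("</ul>")
--                 in_list = False
--             html_parts.append(f"<h2>{line[3:].strip()}</h2>")
--             continue
--
--         if line.startswith("- "):
--             if not in_list:
--                 html_parts.append("<ul>")
--                 in_list = True
--             html_parts.append(f"<li>{line[2:].strip()}</li>")
--             continue
--
--         if in_list:
--             html_parts.append("</ul>")
--             in_list = False
--         html_parts.append(f"<p>{line}</p>")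
--
--     if in_list:
--         html_parts.append("</ul>")
--
--     html_parts.append("</body>")
--     html_parts.append("</html>")
--     return "\n".join(html_parts)
-- ===== SOURCE B (Python) =====
-- def _markdown_like_text_to_rtl_html(content: str) -> str:
--     # Classify each stripped line once, then emit grouped output: a run of
--     # consecutive 'li' lines becomes one <ul>...</ul> block (no in_list flag).
--     pairs = []
--     for raw in content.splitlines():
--         line = raw.strip()
--         if not line:
--             pairs.append(("blank", '<div style="height: 8px;"></div>'))
--         elif line.startswith("# "):
--             pairs.append(("h1", f"<h1>{line[2:].strip()}</h1>"))
--         elif line.startswith("## "):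
--             pairs.append(("h2", f"<h2>{line[3:].strip()}</h2>"))
--         elif line.startswith("- "):
--             pairs.append(("li", f"<li>{line[2:].strip()}</li>"))
--         else:
--             pairs.append(("p", f"<p>{line}</p>"))
--
--     parts = [
--         "<html>",
--         '<body dir="rtl" style="direction: rtl; text-align: right; font-family: Arial, sans-serif; line-height: 1.6;">',
--     ]
--     i = 0
--     n = len(pairs)
--     while i < n:
--         if pairs[i][0] == "li":
--             parts.append("<ul>")
--             while i < n and pairs[i][0] == "li":
--                 parts.append(pairs[i][1])
--                 i += 1
--             parts.append("</ul>")
--         else: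
--             parts.append(pairs[i][1])
--             i += 1
--     parts.append("</body>")
--     parts.append("</html>")
--     return "\n".join(parts)
-- ===== Notes on version B (the rewrite author's own statement) =====
-- stated objective: alternative
-- what changed: Replaces A's mutable in_list flag threaded through every branch by a two-phase decomposition: first classify each stripped line into a (type, fragment) pair, then emit output by wrapping each maximal run of consecutive list-item lines in one ul block.
import Mathlib
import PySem

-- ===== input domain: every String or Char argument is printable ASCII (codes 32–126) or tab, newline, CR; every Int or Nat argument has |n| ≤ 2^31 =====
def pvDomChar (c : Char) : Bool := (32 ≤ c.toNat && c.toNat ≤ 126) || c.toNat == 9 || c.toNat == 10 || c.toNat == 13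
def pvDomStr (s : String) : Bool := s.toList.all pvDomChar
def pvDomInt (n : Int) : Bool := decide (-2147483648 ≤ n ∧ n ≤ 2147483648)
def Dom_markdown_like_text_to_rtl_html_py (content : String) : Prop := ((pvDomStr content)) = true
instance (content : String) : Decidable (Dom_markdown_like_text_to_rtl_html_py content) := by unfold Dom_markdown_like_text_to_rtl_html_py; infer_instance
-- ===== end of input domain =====

-- B replaces A's running in_list flag by classify-then-group over runs of consecutive list lines; objective: alternative decomposition, same cost.

-- ===== PORT A =====
-- one iteration of A's loop: state = (html_parts, in_list)
def mdStepA (st : List String × Bool) (raw_line : String) : List String × Bool :=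
  let line := PySem.Str.strip raw_line
  if line = "" then
    let st' := if st.2 then (st.1 ++ ["</ul>"], false) else st
    (st'.1 ++ ["<div style=\"height: 8px;\"></div>"], st'.2)
  else if PySem.Str.startswith line "# " then
    let st' := if st.2 then (st.1 ++ ["</ul>"], false) else st
    (st'.1 ++ ["<h1>" ++ PySem.Str.strip (PySem.Str.slice line (some 2) none) ++ "</h1>"], st'.2)
  else if PySem.Str.startswith line "## " then
    let st' := if st.2 then (st.1 ++ ["</ul>"], false) else st
    (st'.1 ++ ["<h2>" ++ PySem.Str.strip (PySem.Str.slice line (some 3) none) ++ "</h2>"], st'.2)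
  else if PySem.Str.startswith line "- " then
    let st' := if st.2 then st else (st.1 ++ ["<ul>"], true)
    (st'.1 ++ ["<li>" ++ PySem.Str.strip (PySem.Str.slice line (some 2) none) ++ "</li>"], st'.2)
  else
    let st' := if st.2 then (st.1 ++ ["</ul>"], false) else st
    (st'.1 ++ ["<p>" ++ line ++ "</p>"], st'.2)

def markdown_like_text_to_rtl_html_py (content : String) : String :=
  let lines := PySem.Str.splitlines content
  let st := lines.foldl mdStepA
    (["<html>",
      "<body dir=\"rtl\" style=\"direction: rtl; text-align: right; font-family: Arial, sans-serif; line-height: 1.6;\">"],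
     false)
  let parts := if st.2 then st.1 ++ ["</ul>"] else st.1
  PySem.Str.join "\n" (parts ++ ["</body>", "</html>"])

-- ===== PORT B =====
-- phase 1: classify each stripped line into (type, rendered fragment)
def mdClassify (raw : String) : String × String :=
  let line := PySem.Str.strip raw
  if line = "" then ("blank", "<div style=\"height: 8px;\"></div>")
  else if PySem.Str.startswith line "# " then
    ("h1", "<h1>" ++ PySem.Str.strip (PySem.Str.slice line (some 2) none) ++ "</h1>")
  else if PySem.Str.startswith line "## " then
    ("h2", "<h2>" ++ PySem.Str.strip (PySem.Str.slice line (some 3) none) ++ "</h2>")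
  else if PySem.Str.startswith line "- " then
    ("li", "<li>" ++ PySem.Str.strip (PySem.Str.slice line (some 2) none) ++ "</li>")
  else ("p", "<p>" ++ line ++ "</p>")

-- phase 2: emit, wrapping each maximal run of consecutive "li" pairs in <ul>…</ul>
mutual
def mdGroup : List (String × String) → List String
  | [] => []
  | (t, f) :: rest => if t = "li" then "<ul>" :: f :: mdRun rest else f :: mdGroup rest
def mdRun : List (String × String) → List String
  | [] => ["</ul>"]
  | (t, f) :: rest => if t = "li" then f :: mdRun rest else "</ul>" :: f :: mdGroup rest
end

def markdown_like_text_to_rtl_html_py_alt (content : String) : String :=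
  let pairs := (PySem.Str.splitlines content).map mdClassify
  PySem.Str.join "\n"
    (["<html>",
      "<body dir=\"rtl\" style=\"direction: rtl; text-align: right; font-family: Arial, sans-serif; line-height: 1.6;\">"]
     ++ mdGroup pairs ++ ["</body>", "</html>"])

-- ===== PRECONDITION & SPEC =====
def Spec_markdown_like_text_to_rtl_html_py (content : String) (out : String) : Prop := out = markdown_like_text_to_rtl_html_py_alt content
instance (content : String) (out : String) : Decidable (Spec_markdown_like_text_to_rtl_html_py content out) := by unfold Spec_markdown_like_text_to_rtl_html_py; infer_instance

-- ===== CLAIM (what is proved, stated in full; the proofs are below) =====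
def Claim_equal_markdown_like_text_to_rtl_html_py : Prop := ∀ (content : String), Dom_markdown_like_text_to_rtl_html_py content → Spec_markdown_like_text_to_rtl_html_py content (markdown_like_text_to_rtl_html_py content)

-- ===== LEMMAS AND PROOFS =====

-- A's loop from state (acc, b), followed by the final close of an open list,
-- appends exactly mdGroup (b = false) resp. mdRun (b = true) of the classified lines.
def mdCloseA (lines : List String) (st : List String × Bool) : List String :=
  let st' := lines.foldl mdStepA st
  if st'.2 then st'.1 ++ ["</ul>"] else st'.1

theorem mdCloseA_eq (lines : List String) : ∀ (acc : List String),
    mdCloseA lines (acc, false) = acc ++ mdGroup (lines.map mdClassify) ∧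
    mdCloseA lines (acc, true) = acc ++ mdRun (lines.map mdClassify) := by
  induction lines with
  | nil => intro acc; simp [mdCloseA, mdGroup, mdRun]
  | cons l ls ih =>
    intro acc
    have h1 : ∀ a, mdCloseA ls (a, false) = a ++ mdGroup (ls.map mdClassify) :=
      fun a => (ih a).1
    have h2 : ∀ a, mdCloseA ls (a, true) = a ++ mdRun (ls.map mdClassify) :=
      fun a => (ih a).2
    have hstep : ∀ st : List String × Bool, mdCloseA (l :: ls) st = mdCloseA ls (mdStepA st l) := by
      intro st; simp [mdCloseA]
    constructor <;>
      · rw [hstep]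
        simp only [mdStepA, mdClassify, List.map_cons]
        split_ifs <;> simp_all [mdGroup, mdRun]

-- ===== VERDICT (by name: the statement is the Claim_ definition above) =====
theorem markdown_like_text_to_rtl_html_py_spec : Claim_equal_markdown_like_text_to_rtl_html_py := by
  intro content _
  unfold Spec_markdown_like_text_to_rtl_html_py
  unfold markdown_like_text_to_rtl_html_py markdown_like_text_to_rtl_html_py_alt
  have h := (mdCloseA_eq (PySem.Str.splitlines content)
      ["<html>",
       "<body dir=\"rtl\" style=\"direction: rtl; text-align: right; font-family: Arial, sans-serif; line-height: 1.6;\">"]).1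
  simp only [mdCloseA] at h
  simp only [h, List.append_assoc]
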